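-- pv_equiv track=rewrite | github.com/AbdulRahmanAzam/salesai | src/outreach_agent/sender.py | _plain_to_html
-- ===== SOURCE A (Python) =====
-- def _plain_to_html(text: str) -> str:
--     """Convert plain text to simple HTML email body."""
--     import html as html_module
--
--     escaped = html_module.escape(text)
--     paragraphs = escaped.split("\n\n")
--     html_parts = []
--     for p in paragraphs:
--         lines = p.replace("\n", "<br>")
--         html_parts.append(f"<p style='margin: 0 0 12px 0; line-height: 1.5;'>{lines}</p>")
--     return (
--         "<div style='font-family: -apple-system, BlinkMacSystemFont, sans-serif; "
--         "font-size: 14px; color: #1a1a2e; max-width: 600px;'>"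
--         + "".join(html_parts)
--         + "</div>"
--     )
-- ===== SOURCE B (Python) =====
-- def _plain_to_html(text: str) -> str:
--     """Convert plain text to simple HTML email body."""
--     P = "<p style='margin: 0 0 12px 0; line-height: 1.5;'>"
--     # html.escape(text) with its default quote=True, inlined
--     escaped = (
--         text.replace("&", "&amp;")
--         .replace("<", "&lt;")
--         .replace(">", "&gt;")
--         .replace('"', "&quot;")
--         .replace("'", "&#x27;")
--     )
--     inner = escaped.replace("\n\n", "</p>" + P).replace("\n", "<br>")
--     return (
--         "<div style='font-family: -apple-system, BlinkMacSystemFont, sans-serif; "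
--         "font-size: 14px; color: #1a1a2e; max-width: 600px;'>"
--         + P + inner + "</p>"
--         + "</div>"
--     )
-- ===== Notes on version B (the rewrite author's own statement) =====
-- stated objective: idiomatic
-- what changed: Replaces the split-into-paragraphs / per-paragraph loop / list-accumulate / join pipeline with two chained str.replace calls on the escaped text ('\n\n' -> '</p><p ...>' then '\n' -> '<br>') wrapped once in the fixed prefix/suffix.
import Mathlib
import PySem

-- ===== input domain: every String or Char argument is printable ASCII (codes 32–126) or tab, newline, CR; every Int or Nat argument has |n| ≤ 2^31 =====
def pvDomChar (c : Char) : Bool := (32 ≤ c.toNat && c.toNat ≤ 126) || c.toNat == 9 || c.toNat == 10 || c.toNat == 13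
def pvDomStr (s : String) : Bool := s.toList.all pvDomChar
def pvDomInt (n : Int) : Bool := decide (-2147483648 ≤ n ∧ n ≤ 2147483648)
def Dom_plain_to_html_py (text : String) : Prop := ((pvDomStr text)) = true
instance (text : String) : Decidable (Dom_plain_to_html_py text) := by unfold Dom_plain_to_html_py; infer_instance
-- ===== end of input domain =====

-- B replaces A's split/loop/accumulate/join pipeline by two chained str.replace calls
-- ('\n\n' -> '</p><p …>' then '\n' -> '<br>') on the escaped text (idiomatic; same cost).

-- ===== PORT A =====
-- shared helper: Python's html.escape(s) with its default quote=True (both Source A and Source B call it)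
def pvEscape (s : String) : String :=
  let s := PySem.Str.replace s "&" "&amp;"
  let s := PySem.Str.replace s "<" "&lt;"
  let s := PySem.Str.replace s ">" "&gt;"
  let s := PySem.Str.replace s "\"" "&quot;"
  PySem.Str.replace s "'" "&#x27;"

def plain_to_html_py (text : String) : String :=
  let escaped := pvEscape text
  -- separator "\n\n" is nonempty, so Python's str.split never raises: split? is `some` here
  let paragraphs := (PySem.Str.split? escaped "\n\n").getD []
  let html_parts := paragraphs.foldl (fun acc p =>
      let lines := PySem.Str.replace p "\n" "<br>"
      acc ++ ["<p style='margin: 0 0 12px 0; line-height: 1.5;'>" ++ lines ++ "</p>"]) ([] : List String)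
  "<div style='font-family: -apple-system, BlinkMacSystemFont, sans-serif; font-size: 14px; color: #1a1a2e; max-width: 600px;'>"
    ++ PySem.Str.join "" html_parts ++ "</div>"

-- ===== PORT B =====
def plain_to_html_py_alt (text : String) : String :=
  let pTag := "<p style='margin: 0 0 12px 0; line-height: 1.5;'>"
  let escaped := pvEscape text
  let inner := PySem.Str.replace (PySem.Str.replace escaped "\n\n" ("</p>" ++ pTag)) "\n" "<br>"
  "<div style='font-family: -apple-system, BlinkMacSystemFont, sans-serif; font-size: 14px; color: #1a1a2e; max-width: 600px;'>"
    ++ pTag ++ inner ++ "</p>" ++ "</div>"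

-- ===== PRECONDITION & SPEC =====
def Spec_plain_to_html_py (text : String) (out : String) : Prop := out = plain_to_html_py_alt text
instance (text : String) (out : String) : Decidable (Spec_plain_to_html_py text out) := by unfold Spec_plain_to_html_py; infer_instance

-- ===== CLAIM (what is proved, stated in full; the proofs are below) =====
def Claim_equal_plain_to_html_py : Prop := ∀ (text : String), Dom_plain_to_html_py text → Spec_plain_to_html_py text (plain_to_html_py text)

-- ===== LEMMAS AND PROOFS =====

-- structural (fuel-indexed) mirror of PySem.Chars.replace.go without the accumulator
def repF (old new : List Char) : Nat → List Char → List Char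
  | 0, l => l
  | _+1, [] => []
  | fuel+1, c :: t =>
    if old.isPrefixOf (c :: t) then new ++ repF old new fuel ((c :: t).drop old.length)
    else c :: repF old new fuel t

-- prepend a list of chars onto the first piece
def consPre (pre : List Char) : List (List Char) → List (List Char)
  | [] => [pre]
  | h :: t => (pre ++ h) :: t

-- structural (fuel-indexed) mirror of PySem.Chars.splitOn.go without the accumulators
def splF (sep : List Char) : Nat → List Char → List (List Char)
  | 0, l => [l]
  | _+1, [] => [[]]
  | fuel+1, c :: t =>
    if sep.isPrefixOf (c :: t) then [] :: splF sep fuel ((c :: t).drop sep.length)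
    else consPre [c] (splF sep fuel t)

-- single-character replace in canonical-fuel form
def rep1 (c : Char) (new : List Char) (l : List Char) : List Char := repF [c] new l.length l

theorem consPre_append (a b : List Char) (X : List (List Char)) :
    consPre (a ++ b) X = consPre a (consPre b X) := by
  cases X <;> simp [consPre]

theorem splF_ne_nil (sep : List Char) (fuel : Nat) (l : List Char) :
    splF sep fuel l ≠ [] := by
  cases fuel with
  | zero => simp [splF]
  | succ f =>
    cases l with
    | nil => simp [splF]
    | cons c t =>
      simp only [splF]
      split
      · simp
      · cases h : splF sep f t <;> simp [consPre]

theorem consPre_nil (X : List (List Char)) (h : X ≠ []) : consPre [] X = X := by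
  cases X with
  | nil => exact absurd rfl h
  | cons a b => simp [consPre]

theorem replace_go_eq (old new : List Char) (fuel : Nat) :
    ∀ (l acc : List Char),
      PySem.Chars.replace.go old new fuel l acc = acc.reverse ++ repF old new fuel l := by
  induction fuel with
  | zero => intro l acc; simp [PySem.Chars.replace.go, repF]
  | succ f ih =>
    intro l acc
    cases l with
    | nil => simp [PySem.Chars.replace.go, repF]
    | cons c t =>
      rw [PySem.Chars.replace.go]
      simp only [repF]
      split
      · rw [ih]; simp
      · rw [ih]; simp

theorem replace_eq_repF (s old new : List Char) (h : old ≠ []) :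
    PySem.Chars.replace s old new = repF old new s.length s := by
  simp [PySem.Chars.replace, List.isEmpty_iff, h, replace_go_eq]

theorem splitOn_go_eq (sep : List Char) (fuel : Nat) :
    ∀ (l cur : List Char) (acc : List (List Char)),
      PySem.Chars.splitOn.go sep fuel l cur acc =
        acc.reverse ++ consPre cur.reverse (splF sep fuel l) := by
  induction fuel with
  | zero => intro l cur acc; simp [PySem.Chars.splitOn.go, splF, consPre]
  | succ f ih =>
    intro l cur acc
    cases l with
    | nil => simp [PySem.Chars.splitOn.go, splF, consPre]
    | cons c t =>
      rw [PySem.Chars.splitOn.go]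
      simp only [splF]
      split
      · rw [ih]
        have h := splF_ne_nil sep f ((c :: t).drop sep.length)
        cases hX : splF sep f ((c :: t).drop sep.length) with
        | nil => exact absurd hX h
        | cons a b => simp [consPre]
      · rw [ih]
        have : (c :: cur).reverse = cur.reverse ++ [c] := by simp
        rw [this, consPre_append]

theorem splitOn_eq_splF (s sep : List Char) :
    PySem.Chars.splitOn s sep = splF sep (s.length + 1) s := by
  rw [PySem.Chars.splitOn, splitOn_go_eq]
  simp [consPre_nil _ (splF_ne_nil sep _ _)]

theorem prefix_drop_le (old : List Char) (c : Char) (t : List Char)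
    (hne : old ≠ []) (hp : old.isPrefixOf (c :: t)) :
    ((c :: t).drop old.length).length ≤ t.length := by
  have h1 : 1 ≤ old.length := by
    cases old with
    | nil => exact absurd rfl hne
    | cons _ _ => simp
  simp only [List.length_drop, List.length_cons]
  omega

theorem splF_fuel_indep (sep : List Char) (hne : sep ≠ []) :
    ∀ (f1 f2 : Nat) (l : List Char), l.length ≤ f1 → l.length ≤ f2 →
      splF sep f1 l = splF sep f2 l := by
  intro f1
  induction f1 with
  | zero =>
    intro f2 l h1 _
    have : l = [] := by cases l <;> simp_all
    subst this
    cases f2 <;> simp [splF]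
  | succ f ih =>
    intro f2 l h1 h2
    cases l with
    | nil => cases f2 <;> simp [splF]
    | cons c t =>
      cases f2 with
      | zero => simp at h2
      | succ g =>
        simp only [splF]
        split
        · next hp =>
          have hd := prefix_drop_le sep c t hne hp
          rw [ih g _ (by simp at h1; omega) (by simp at h2; omega)]
        · rw [ih g t (by simp at h1; omega) (by simp at h2; omega)]

theorem intercalate_cons_ne (sep a : List Char) (X : List (List Char)) (h : X ≠ []) :
    List.intercalate sep (a :: X) = a ++ sep ++ List.intercalate sep X := by
  cases X with
  | nil => exact absurd rfl h
  | cons x t => simp [List.intercalate, List.intersperse]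

theorem intercalate_consPre (sep pre : List Char) (X : List (List Char)) (h : X ≠ []) :
    List.intercalate sep (consPre pre X) = pre ++ List.intercalate sep X := by
  cases X with
  | nil => exact absurd rfl h
  | cons x t =>
    cases t with
    | nil => simp [consPre, List.intercalate, List.intersperse]
    | cons y u =>
      simp only [consPre]
      rw [intercalate_cons_ne sep _ (y :: u) (by simp),
          intercalate_cons_ne sep x (y :: u) (by simp)]
      simp

theorem repF_eq_join_splF (sep new : List Char) (hne : sep ≠ []) :
    ∀ (fuel : Nat) (l : List Char), l.length ≤ fuel →
      repF sep new fuel l = PySem.Chars.join new (splF sep fuel l) := by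
  intro fuel
  induction fuel with
  | zero =>
    intro l h
    have : l = [] := by cases l <;> simp_all
    subst this
    simp [repF, splF, PySem.Chars.join, List.intercalate]
  | succ f ih =>
    intro l h
    cases l with
    | nil => simp [repF, splF, PySem.Chars.join, List.intercalate]
    | cons c t =>
      simp only [repF, splF]
      split
      · next hp =>
        rw [ih _ (le_trans (prefix_drop_le sep c t hne hp) (by simp at h; omega))]
        simp only [PySem.Chars.join]
        rw [intercalate_cons_ne new [] _ (splF_ne_nil sep f _)]
        simp
      · rw [ih t (by simp at h; omega)]
        simp only [PySem.Chars.join]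
        rw [intercalate_consPre new [c] _ (splF_ne_nil sep f t)]
        simp

theorem replace_eq_join_splitOn (s sep new : List Char) (hne : sep ≠ []) :
    PySem.Chars.replace s sep new = PySem.Chars.join new (PySem.Chars.splitOn s sep) := by
  rw [replace_eq_repF s sep new hne, splitOn_eq_splF,
      splF_fuel_indep sep hne (s.length + 1) s.length s (by omega) (le_refl _),
      repF_eq_join_splF sep new hne s.length s (le_refl _)]

theorem rep1_cons (c : Char) (new : List Char) (x : Char) (t : List Char) :
    rep1 c new (x :: t) = if c = x then new ++ rep1 c new t else x :: rep1 c new t := by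
  simp only [rep1, List.length_cons, repF, List.isPrefixOf, List.drop_succ_cons, Bool.and_true]
  by_cases h : c = x <;> simp [h]

theorem replace_single_eq_rep1 (s : List Char) (c : Char) (new : List Char) :
    PySem.Chars.replace s [c] new = rep1 c new s := by
  rw [replace_eq_repF s [c] new (by simp)]; rfl

theorem rep1_append (c : Char) (new : List Char) (a b : List Char) :
    rep1 c new (a ++ b) = rep1 c new a ++ rep1 c new b := by
  induction a with
  | nil => simp [rep1, repF]
  | cons x t ih =>
    rw [List.cons_append, rep1_cons, rep1_cons, ih]
    split <;> simp

theorem rep1_intercalate (c : Char) (new sep : List Char) (ps : List (List Char)) :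
    rep1 c new (List.intercalate sep ps) =
      List.intercalate (rep1 c new sep) (ps.map (rep1 c new)) := by
  induction ps with
  | nil => simp [List.intercalate, rep1, repF]
  | cons x t ih =>
    cases t with
    | nil => simp [List.intercalate, List.intersperse]
    | cons y u =>
      rw [intercalate_cons_ne sep x (y :: u) (by simp), rep1_append, rep1_append, ih]
      simp only [List.map_cons]
      rw [intercalate_cons_ne (rep1 c new sep) _ (rep1 c new y :: u.map (rep1 c new)) (by simp)]

theorem rep1_of_not_mem (c : Char) (new l : List Char) (h : c ∉ l) :
    rep1 c new l = l := by
  induction l with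
  | nil => simp [rep1, repF]
  | cons x t ih =>
    rw [rep1_cons]
    have hcx : ¬ c = x := by intro hh; exact h (hh ▸ List.mem_cons_self)
    rw [if_neg hcx, ih (fun hm => h (List.mem_cons_of_mem x hm))]

theorem wrap_intercalate (P E : List Char) (f : List Char → List Char) :
    ∀ (ps : List (List Char)), ps ≠ [] →
      List.intercalate [] (ps.map (fun p => P ++ f p ++ E)) =
        P ++ List.intercalate (E ++ P) (ps.map f) ++ E := by
  intro ps
  induction ps with
  | nil => intro h; exact absurd rfl h
  | cons x t ih =>
    intro _
    cases t with
    | nil => simp [List.intercalate]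
    | cons y u =>
      simp only [List.map_cons]
      rw [intercalate_cons_ne [] _ _ (by simp),
          intercalate_cons_ne (E ++ P) (f x) _ (by simp)]
      have := ih (by simp)
      simp only [List.map_cons] at this
      rw [this]
      simp

theorem foldl_append_map {α β : Type} (f : α → β) :
    ∀ (ps : List α) (acc : List β),
      ps.foldl (fun a p => a ++ [f p]) acc = acc ++ ps.map f := by
  intro ps
  induction ps with
  | nil => simp
  | cons x t ih => intro acc; simp [List.foldl_cons, ih]

-- ===== VERDICT (by name: the statement is the Claim_ definition above) =====
theorem plain_to_html_py_spec : Claim_equal_plain_to_html_py := by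
  intro text _
  unfold Spec_plain_to_html_py plain_to_html_py plain_to_html_py_alt
  rw [← String.toList_inj]
  have hsep : ("\n\n" : String).toList ≠ [] := by decide
  have hsplit : (PySem.Str.split? (pvEscape text) "\n\n").getD [] =
      (PySem.Chars.splitOn (pvEscape text).toList ("\n\n" : String).toList).map String.ofList := by
    simp [PySem.Str.split?, PySem.Chars.split?]
  simp only [hsplit, foldl_append_map]
  simp only [String.toList_append, PySem.Str.toList_join, PySem.Str.toList_replace,
    List.map_map, List.nil_append, Function.comp_def, String.toList_ofList]
  have hnl : ("\n" : String).toList = ['\n'] := by decide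
  have h0 : ("" : String).toList = ([] : List Char) := by decide
  have hne : PySem.Chars.splitOn (pvEscape text).toList ("\n\n" : String).toList ≠ [] := by
    rw [splitOn_eq_splF]; exact splF_ne_nil _ _ _
  rw [replace_eq_join_splitOn (pvEscape text).toList ("\n\n" : String).toList _ hsep]
  simp only [hnl, h0, replace_single_eq_rep1, PySem.Chars.join]
  rw [rep1_intercalate]
  have hnm : ('\n') ∉ ("</p>" : String).toList ++ ("<p style='margin: 0 0 12px 0; line-height: 1.5;'>" : String).toList := by decide
  rw [rep1_of_not_mem _ _ _ hnm]
  rw [wrap_intercalate _ _ _ _ hne]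
  simp only [List.append_assoc]
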